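-- pv_equiv track=rewrite | github.com/rslabon/aoc2025 | day4.py | find_rolls_to_remove
-- ===== SOURCE A (Python) =====
-- def find_rolls_to_remove(paper_positions):
--     removed = set()
--     for (row, column) in paper_positions:
--         adj = 0
--         for r, c in [(-1, -1), (-1, 0), (-1, 1), (0, -1), (0, 1), (1, -1), (1, 0), (1, 1)]:
--             if (row + r, column + c) in paper_positions:
--                 adj += 1
--
--         if adj < 4:
--             removed.add((row, column))
--
--     return removed
-- ===== SOURCE B (Python) =====
-- def find_rolls_to_remove(paper_positions):
--     present = set(paper_positions)
--     counts = {}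
--     for (row, column) in present:
--         for r, c in [(-1, -1), (-1, 0), (-1, 1), (0, -1), (0, 1), (1, -1), (1, 0), (1, 1)]:
--             key = (row + r, column + c)
--             counts[key] = counts.get(key, 0) + 1
--     return {p for p in present if counts.get(p, 0) < 4}
-- ===== Notes on version B (the rewrite author's own statement) =====
-- stated objective: alternative
-- what changed: Replaces the per-position gather (8 membership tests against the input list for every list element) with a single scatter pass over the deduplicated set that builds a neighbor-count table, followed by a dict-lookup filter.
import Mathlib
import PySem

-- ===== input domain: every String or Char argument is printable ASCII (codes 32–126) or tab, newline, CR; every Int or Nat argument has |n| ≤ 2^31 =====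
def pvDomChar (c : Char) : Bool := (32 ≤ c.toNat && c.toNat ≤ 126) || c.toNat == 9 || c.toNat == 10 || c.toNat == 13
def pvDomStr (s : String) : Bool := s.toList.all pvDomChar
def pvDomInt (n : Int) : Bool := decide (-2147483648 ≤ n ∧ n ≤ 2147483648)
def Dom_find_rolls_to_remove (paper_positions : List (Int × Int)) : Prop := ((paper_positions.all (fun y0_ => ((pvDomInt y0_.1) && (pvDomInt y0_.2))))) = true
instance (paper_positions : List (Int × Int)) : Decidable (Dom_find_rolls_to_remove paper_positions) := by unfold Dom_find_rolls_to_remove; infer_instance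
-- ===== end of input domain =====

-- B replaces A's per-position gather (8 membership scans of the input list per element) by one
-- scatter pass over the deduplicated set building a neighbor-count dict, then a lookup filter.

-- ===== PORT A =====
def pvOffsets : List (Int × Int) := [(-1, -1), (-1, 0), (-1, 1), (0, -1), (0, 1), (1, -1), (1, 0), (1, 1)]

def find_rolls_to_remove (paper_positions : List (Int × Int)) : List (Int × Int) :=
  paper_positions.foldl (fun removed rc =>
    let adj : Int := pvOffsets.foldl (fun adj d =>
      if (rc.1 + d.1, rc.2 + d.2) ∈ paper_positions then adj + 1 else adj) 0
    if adj < 4 then PySem.Set.add removed rc else removed) []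

-- ===== PORT B =====
def find_rolls_to_remove_alt (paper_positions : List (Int × Int)) : List (Int × Int) :=
  let present := PySem.Set.ofList paper_positions
  let counts : PySem.Dict (Int × Int) Int := present.foldl (fun counts q =>
    pvOffsets.foldl (fun counts d =>
      let key := (q.1 + d.1, q.2 + d.2)
      counts.insert key (counts.getD key 0 + 1)) counts) PySem.Dict.empty
  present.foldl (fun removed p =>
    if counts.getD p 0 < 4 then PySem.Set.add removed p else removed) []

-- ===== PRECONDITION & SPEC =====
def Spec_find_rolls_to_remove (paper_positions : List (Int × Int)) (out : List (Int × Int)) : Prop := out = find_rolls_to_remove_alt paper_positions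
instance (paper_positions : List (Int × Int)) (out : List (Int × Int)) : Decidable (Spec_find_rolls_to_remove paper_positions out) := by unfold Spec_find_rolls_to_remove; infer_instance

-- ===== CLAIM (what is proved, stated in full; the proofs are below) =====
def Claim_equal_find_rolls_to_remove : Prop := ∀ (paper_positions : List (Int × Int)), Dom_find_rolls_to_remove paper_positions → Spec_find_rolls_to_remove paper_positions (find_rolls_to_remove paper_positions)

-- ===== LEMMAS AND PROOFS =====

-- A conditional Set.add loop is a filter of the plain Set.update, for suitable starts.
theorem pv_foldl_condAdd {α : Type} [BEq α] [LawfulBEq α] (p : α → Prop) [DecidablePred p] :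
    ∀ (xs s t : List α), (∀ x ∈ s, p x) → (∀ z, p z → (z ∈ s ↔ z ∈ t)) →
      s.filter (fun x => decide (p x)) = t.filter (fun x => decide (p x)) →
      xs.foldl (fun acc x => if p x then PySem.Set.add acc x else acc) s
        = (PySem.Set.update t xs).filter (fun x => decide (p x)) := by
  intro xs
  induction xs with
  | nil =>
    intro s t h1 h2 h3
    simp only [List.foldl_nil, PySem.Set.update]
    rw [← h3, List.filter_eq_self.mpr (by intro a ha; simpa using h1 a ha)]
  | cons x xs ih =>
    intro s t h1 h2 h3
    have hupd : PySem.Set.update t (x :: xs) = xs.foldl PySem.Set.add (PySem.Set.add t x) := rfl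
    rw [hupd, List.foldl_cons]
    by_cases hx : p x
    · rw [if_pos hx]
      apply ih
      · intro y hy
        rcases (PySem.Set.mem_add _ _ _).mp hy with h | h
        · exact h1 y h
        · exact h ▸ hx
      · intro z hz
        rw [PySem.Set.mem_add, PySem.Set.mem_add, h2 z hz]
      · by_cases hxs : x ∈ s
        · rw [PySem.Set.add_of_mem hxs, PySem.Set.add_of_mem ((h2 x hx).mp hxs)]
          exact h3
        · rw [PySem.Set.add_of_not_mem hxs,
              PySem.Set.add_of_not_mem (fun h => hxs ((h2 x hx).mpr h)),
              List.filter_append, List.filter_append, h3]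
    · rw [if_neg hx]
      apply ih
      · exact h1
      · intro z hz
        rw [h2 z hz, PySem.Set.mem_add]
        constructor
        · exact Or.inl
        · rintro (h | rfl)
          · exact h
          · exact absurd hz hx
      · by_cases hxt : x ∈ t
        · rw [PySem.Set.add_of_mem hxt]; exact h3
        · rw [PySem.Set.add_of_not_mem hxt, List.filter_append, h3]
          simp [hx]

-- getD of the scatter counter fold: base value plus total occurrence count of the key.
theorem pv_counts_getD (P : List (Int × Int)) (c : PySem.Dict (Int × Int) Int) (v : Int × Int) :
    (P.foldl (fun counts q =>
      pvOffsets.foldl (fun counts d =>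
        counts.insert (q.1 + d.1, q.2 + d.2) ((counts.getD (q.1 + d.1, q.2 + d.2) 0) + 1)) counts) c).getD v 0
    = c.getD v 0 + ((P.map (fun q => ((pvOffsets.map (fun d => (q.1 + d.1, q.2 + d.2))).count v : Int))).sum) := by
  induction P generalizing c with
  | nil => simp
  | cons q P ih =>
    rw [List.foldl_cons, ih, List.map_cons, List.sum_cons]
    have hinner : pvOffsets.foldl (fun counts d =>
        counts.insert (q.1 + d.1, q.2 + d.2) ((counts.getD (q.1 + d.1, q.2 + d.2) 0) + 1)) c
      = (pvOffsets.map (fun d => (q.1 + d.1, q.2 + d.2))).foldl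
          (fun counts k => counts.insert k ((counts.getD k 0) + 1)) c := by
      rw [List.foldl_map]
    rw [hinner, PySem.Dict.getD_foldl_insert_add_one]
    ring

-- a 0/1-indicator sum over a Nodup list is membership.
theorem pv_sum_indicator (w : Int × Int) :
    ∀ (P : List (Int × Int)), P.Nodup →
      (P.map (fun q => if q = w then (1 : Int) else 0)).sum = if w ∈ P then 1 else 0 := by
  intro P
  induction P with
  | nil => simp
  | cons q P ih =>
    intro hnd
    rw [List.nodup_cons] at hnd
    rw [List.map_cons, List.sum_cons, ih hnd.2]
    by_cases hq : q = w
    · subst hq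
      simp [hnd.1]
    · simp [hq, Ne.symm hq, List.mem_cons]

-- peel one indicator column off the scattered sum.
theorem pv_step (P : List (Int × Int)) (hP : P.Nodup) (a b : Int) (p w : Int × Int)
    (hw : ∀ q : Int × Int, ((q.1 + a, q.2 + b) = p) ↔ (q = w)) (g : (Int × Int) → Int) :
    (P.map (fun q => g q + if (q.1 + a, q.2 + b) = p then (1 : Int) else 0)).sum
      = (P.map g).sum + (if w ∈ P then 1 else 0) := by
  rw [PySem.List.sum_map_add_int]
  congr 1
  rw [show (fun q : Int × Int => if (q.1 + a, q.2 + b) = p then (1 : Int) else 0)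
        = (fun q => if q = w then (1 : Int) else 0) from funext fun q => if_congr (hw q) rfl rfl]
  exact pv_sum_indicator w P hP

-- the scattered neighbor sum equals A's gathered neighbor count.
set_option maxHeartbeats 2000000 in
theorem pv_sum_eq_adj (xs : List (Int × Int)) (p : Int × Int) :
    ((PySem.Set.ofList xs).map (fun q => ((pvOffsets.map (fun d => (q.1 + d.1, q.2 + d.2))).count p : Int))).sum
    = pvOffsets.foldl (fun adj d =>
        if (p.1 + d.1, p.2 + d.2) ∈ xs then adj + 1 else adj) 0 := by
  have hP := PySem.Set.nodup_ofList (xs := xs)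
  have hiff : ∀ (a b : Int) (q : Int × Int), ((q.1 + a, q.2 + b) = p) ↔ (q = (p.1 + -a, p.2 + -b)) := by
    intro a b q
    obtain ⟨p1, p2⟩ := p; obtain ⟨q1, q2⟩ := q
    simp only [Prod.ext_iff]
    constructor <;> (intro h; omega)
  rw [PySem.List.foldl_ite_add_one]
  simp only [pvOffsets, List.map_cons, List.map_nil, List.count_cons, List.count_nil,
    List.countP_cons, List.countP_nil, beq_iff_eq, decide_eq_true_eq]
  push_cast
  rw [pv_step _ hP (-1) (-1) p (p.1 + 1, p.2 + 1) (by intro q; rw [hiff]; try norm_num),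
      pv_step _ hP (-1) 0 p (p.1 + 1, p.2 + 0) (by intro q; rw [hiff]; try norm_num),
      pv_step _ hP (-1) 1 p (p.1 + 1, p.2 + -1) (by intro q; rw [hiff]; try norm_num),
      pv_step _ hP 0 (-1) p (p.1 + 0, p.2 + 1) (by intro q; rw [hiff]; try norm_num),
      pv_step _ hP 0 1 p (p.1 + 0, p.2 + -1) (by intro q; rw [hiff]; try norm_num),
      pv_step _ hP 1 (-1) p (p.1 + -1, p.2 + 1) (by intro q; rw [hiff]; try norm_num),
      pv_step _ hP 1 0 p (p.1 + -1, p.2 + 0) (by intro q; rw [hiff]; try norm_num),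
      pv_step _ hP 1 1 p (p.1 + -1, p.2 + -1) (by intro q; rw [hiff]; try norm_num)]
  rw [show (List.map (fun _ : Int × Int => (0 : Int)) (PySem.Set.ofList xs)).sum = 0 from by simp]
  simp only [PySem.Set.mem_ofList, zero_add]
  split_ifs <;> omega

-- the counter value at p equals A's gathered neighbor count.
theorem pv_counts_eq_adj (xs : List (Int × Int)) (p : Int × Int) :
    ((PySem.Set.ofList xs).foldl (fun counts q =>
      pvOffsets.foldl (fun counts d =>
        counts.insert (q.1 + d.1, q.2 + d.2) ((counts.getD (q.1 + d.1, q.2 + d.2) 0) + 1)) counts)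
        (PySem.Dict.empty : PySem.Dict (Int × Int) Int)).getD p 0
    = pvOffsets.foldl (fun adj d =>
        if (p.1 + d.1, p.2 + d.2) ∈ xs then adj + 1 else adj) 0 := by
  refine (pv_counts_getD (PySem.Set.ofList xs) PySem.Dict.empty p).trans ?_
  rw [pv_sum_eq_adj]
  simp [PySem.Dict.empty, PySem.Dict.getD, PySem.Dict.get?]

-- ===== VERDICT (by name: the statement is the Claim_ definition above) =====
theorem find_rolls_to_remove_spec : Claim_equal_find_rolls_to_remove := by
  intro xs _
  show find_rolls_to_remove xs = find_rolls_to_remove_alt xs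
  have hnd := PySem.Set.nodup_ofList (xs := xs)
  have hself : PySem.Set.update ([] : List (Int × Int)) (PySem.Set.ofList xs) = PySem.Set.ofList xs := by
    rw [PySem.Set.update_eq_append_of_disjoint _ _ hnd (by simp)]
    simp
  have hA := pv_foldl_condAdd
    (fun rc : Int × Int => pvOffsets.foldl (fun adj d =>
      if (rc.1 + d.1, rc.2 + d.2) ∈ xs then adj + 1 else adj) (0 : Int) < 4)
    xs [] [] (by simp) (by simp) rfl
  have hB := pv_foldl_condAdd
    (fun p : Int × Int => ((PySem.Set.ofList xs).foldl (fun counts q =>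
        pvOffsets.foldl (fun counts d =>
          counts.insert (q.1 + d.1, q.2 + d.2) ((counts.getD (q.1 + d.1, q.2 + d.2) 0) + 1)) counts)
        (PySem.Dict.empty : PySem.Dict (Int × Int) Int)).getD p 0 < 4)
    (PySem.Set.ofList xs) [] [] (by simp) (by simp) rfl
  rw [hself] at hB
  calc find_rolls_to_remove xs
      = (PySem.Set.update [] xs).filter (fun rc => decide
          (pvOffsets.foldl (fun adj d =>
            if (rc.1 + d.1, rc.2 + d.2) ∈ xs then adj + 1 else adj) (0 : Int) < 4)) := by
          unfold find_rolls_to_remove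
          exact hA
    _ = (PySem.Set.ofList xs).filter (fun rc => decide
          (pvOffsets.foldl (fun adj d =>
            if (rc.1 + d.1, rc.2 + d.2) ∈ xs then adj + 1 else adj) (0 : Int) < 4)) := by
          rw [PySem.Set.update_nil_left]
    _ = (PySem.Set.ofList xs).filter (fun p => decide
          (((PySem.Set.ofList xs).foldl (fun counts q =>
              pvOffsets.foldl (fun counts d =>
                counts.insert (q.1 + d.1, q.2 + d.2) ((counts.getD (q.1 + d.1, q.2 + d.2) 0) + 1)) counts)
              (PySem.Dict.empty : PySem.Dict (Int × Int) Int)).getD p 0 < 4)) := by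
          apply List.filter_congr
          intro p _
          rw [pv_counts_eq_adj]
    _ = find_rolls_to_remove_alt xs := by
          unfold find_rolls_to_remove_alt
          exact hB.symm
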